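-- pv_equiv track=rewrite | github.com/markmelnic/Carsen-Desktop | selenium_module.py | nextPage
-- ===== SOURCE A (Python) =====
-- def nextPage(dv, currentURL, currentPage):
--     tempLink = []
--
--     if currentPage + 1 == 1:
--         nextLink = currentURL
--         nextLink += "&pageNumber=2"
--     else:
--         i = 0
--         while i < len(currentURL):
--             i = currentURL.find("pageNumber=", i)
--             if i == -1:
--                 break
--             tempLink.append(i + len("pageNumber="))
--             i += len("pageNumber=")
--             i = currentURL.find("&", i)
--             tempLink.append(i)
--
--         nextLink = ''
--         for i in range(tempLink[0]):
--             nextLink += currentURL[i]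
--
--         nextLink += str(currentPage + 2)
--
--         for i in range(len(currentURL) - i - tempLink[0] - len(str(currentPage + 2))):
--             nextLink += currentURL[i + tempLink[0] + len(str(currentPage + 2))]
--
--     return nextLink
-- ===== SOURCE B (Python) =====
-- def nextPage(dv, currentURL, currentPage):
--     if currentPage + 1 == 1:
--         return currentURL + "&pageNumber=2"
--     s0 = currentURL.index("pageNumber=") + len("pageNumber=")
--     nstr = str(currentPage + 2)
--     return currentURL[:s0] + nstr + currentURL[s0 + len(nstr):]
-- ===== Notes on version B (the rewrite author's own statement) =====
-- stated objective: simpler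
-- what changed: B replaces A's while-loop that builds an index table plus two char-by-char copy loops with a single index() and closed-form slicing, keeping everything after the replaced page number.
-- intended difference: On URLs containing 'pageNumber=' with any characters remaining after the replaced page number (and currentPage != 0), A returns a URL whose tail is truncated (its copy loop reuses the leftover loop index, ending the tail at len-s0+1), while B keeps the whole rest of the URL, which is the intended next-page URL. — e.g. on nextPage("", "pageNumber=1&x=1", 1): A returns "pageNumber=3", B returns "pageNumber=3&x=1"
import Mathlib
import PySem

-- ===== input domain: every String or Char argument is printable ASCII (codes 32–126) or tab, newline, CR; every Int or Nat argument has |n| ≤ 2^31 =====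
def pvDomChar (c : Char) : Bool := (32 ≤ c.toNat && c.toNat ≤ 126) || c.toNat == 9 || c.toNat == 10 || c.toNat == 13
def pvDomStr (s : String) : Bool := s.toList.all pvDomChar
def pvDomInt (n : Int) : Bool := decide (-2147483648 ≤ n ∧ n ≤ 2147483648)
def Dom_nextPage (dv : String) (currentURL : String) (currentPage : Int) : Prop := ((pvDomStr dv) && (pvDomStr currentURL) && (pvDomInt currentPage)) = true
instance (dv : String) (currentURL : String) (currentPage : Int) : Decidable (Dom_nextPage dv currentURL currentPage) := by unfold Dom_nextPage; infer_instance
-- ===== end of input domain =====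

-- B replaces A's while-loop index table and two char-by-char copy loops with one index() and
-- closed-form slicing (objective: simpler); on URLs with characters after the replaced page
-- number A truncates the tail, B keeps it (intended difference, see D_nextPage).

-- ===== PORT A =====
-- the 'while i < len(currentURL)' loop; fuel (length+1) only bounds the iterations, which the
-- loop itself limits because each successful find advances i by at least 11.
def nextPageLoopA (cs : List Char) (fuel : Nat) (i : Int) (tempLink : List Int) : Int × List Int :=
  match fuel with
  | 0 => (i, tempLink)
  | fuel + 1 =>
    if i < (cs.length : Int) then
      -- i = currentURL.find("pageNumber=", i); if i == -1: break
      if PySem.Chars.findFrom cs "pageNumber=".toList i = -1 then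
        (PySem.Chars.findFrom cs "pageNumber=".toList i, tempLink)
      else
        -- tempLink.append(i + len("pageNumber=")); i += len("pageNumber=");
        -- i = currentURL.find("&", i); tempLink.append(i)
        nextPageLoopA cs fuel
          (PySem.Chars.findFrom cs "&".toList (PySem.Chars.findFrom cs "pageNumber=".toList i + 11))
          (tempLink ++ [PySem.Chars.findFrom cs "pageNumber=".toList i + 11] ++
            [PySem.Chars.findFrom cs "&".toList (PySem.Chars.findFrom cs "pageNumber=".toList i + 11)])
    else (i, tempLink)

def nextPage (dv : String) (currentURL : String) (currentPage : Int) : String :=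
  let cs := currentURL.toList
  if currentPage + 1 = 1 then
    String.ofList (cs ++ "&pageNumber=2".toList)
  else
    let r := nextPageLoopA cs (cs.length + 1) 0 []
    match PySem.List.pyGet? r.2 0 with
    | none => ""          -- Python raises IndexError (tempLink[0] on empty list); excluded by Pre_
    | some t0 =>
      -- for i in range(tempLink[0]): nextLink += currentURL[i]    (the pair carries the loop variable i)
      let st := (PySem.List.pyRange 0 t0).foldl
        (fun (acc : List Char × Int) j => (acc.1 ++ (PySem.List.pyGet? cs j).toList, j)) ([], r.1)
      let nstr := (PySem.Int.toStr (currentPage + 2)).toList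
      let nl := st.1 ++ nstr
      -- for i in range(len(currentURL) - i - tempLink[0] - len(str(currentPage+2))): …
      let cnt := (cs.length : Int) - st.2 - t0 - (nstr.length : Int)
      String.ofList ((PySem.List.pyRange 0 cnt).foldl
        (fun acc j => acc ++ (PySem.List.pyGet? cs (j + t0 + (nstr.length : Int))).toList) nl)

-- ===== PORT B =====
def nextPage_alt (dv : String) (currentURL : String) (currentPage : Int) : String :=
  if currentPage + 1 = 1 then
    String.ofList (currentURL.toList ++ "&pageNumber=2".toList)
  else
    let cs := currentURL.toList
    -- s0 = currentURL.index("pageNumber=") + 11; .index raises ValueError if absent (excluded by Pre_)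
    let idx := PySem.Chars.find cs "pageNumber=".toList
    if idx = -1 then ""
    else
      let s0 := idx + 11
      let nstr := (PySem.Int.toStr (currentPage + 2)).toList
      String.ofList (PySem.List.slice cs none (some s0) ++ nstr ++
        PySem.List.slice cs (some (s0 + (nstr.length : Int))) none)

-- ===== PRECONDITION & SPEC =====
-- Pre_ excludes exactly the inputs where A raises (currentPage ≠ 0 and the URL lacks
-- "pageNumber=": tempLink stays empty and tempLink[0] raises IndexError; B's .index raises there too).
def Pre_nextPage (dv : String) (currentURL : String) (currentPage : Int) : Prop :=
  currentPage + 1 = 1 ∨ PySem.Chars.find currentURL.toList "pageNumber=".toList ≠ -1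
instance (dv : String) (currentURL : String) (currentPage : Int) : Decidable (Pre_nextPage dv currentURL currentPage) := by unfold Pre_nextPage; infer_instance

def pvWitness_nextPage : String × String × Int := ("d", "http://x?pageNumber=4", 4)

-- On URLs containing "pageNumber=" with any characters remaining after the replaced page number
-- (and currentPage ≠ 0), A returns a URL whose tail is truncated (its copy loop reuses the
-- leftover loop index, ending the tail at len-s0+1), while B keeps the whole rest of the URL,
-- which is the intended next-page URL.
def D_nextPage (dv : String) (currentURL : String) (currentPage : Int) : Prop :=
  currentPage + 1 ≠ 1 ∧ PySem.Chars.find currentURL.toList "pageNumber=".toList ≠ -1 ∧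
    PySem.Chars.find currentURL.toList "pageNumber=".toList + 11 +
      ((PySem.Int.toStr (currentPage + 2)).toList.length : Int) < (currentURL.toList.length : Int)
instance (dv : String) (currentURL : String) (currentPage : Int) : Decidable (D_nextPage dv currentURL currentPage) := by unfold D_nextPage; infer_instance

def Spec_nextPage (dv : String) (currentURL : String) (currentPage : Int) (out : String) : Prop := ¬ D_nextPage dv currentURL currentPage → out = nextPage_alt dv currentURL currentPage
instance (dv : String) (currentURL : String) (currentPage : Int) (out : String) : Decidable (Spec_nextPage dv currentURL currentPage out) := by unfold Spec_nextPage; infer_instance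

def pvDiffWitness_nextPage : String × String × Int := ("", "pageNumber=1&x=1", 1)
def pvDiffWitnessOut_nextPage : String × String := ("pageNumber=3", "pageNumber=3&x=1")

-- ===== CLAIM =====
def Claim_unchanged_nextPage : Prop := ∀ (dv : String) (currentURL : String) (currentPage : Int), Dom_nextPage dv currentURL currentPage → Pre_nextPage dv currentURL currentPage → Spec_nextPage dv currentURL currentPage (nextPage dv currentURL currentPage)
def Claim_changed_nextPage : Prop := Dom_nextPage (pvDiffWitness_nextPage.1) (pvDiffWitness_nextPage.2.1) (pvDiffWitness_nextPage.2.2) ∧ Pre_nextPage (pvDiffWitness_nextPage.1) (pvDiffWitness_nextPage.2.1) (pvDiffWitness_nextPage.2.2) ∧ D_nextPage (pvDiffWitness_nextPage.1) (pvDiffWitness_nextPage.2.1) (pvDiffWitness_nextPage.2.2) ∧ nextPage (pvDiffWitness_nextPage.1) (pvDiffWitness_nextPage.2.1) (pvDiffWitness_nextPage.2.2) = pvDiffWitnessOut_nextPage.1 ∧ nextPage_alt (pvDiffWitness_nextPage.1) (pvDiffWitness_nextPage.2.1) (pvDiffWitness_nextPage.2.2) = pvDiffWitnessOut_nextPage.2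 ∧ pvDiffWitnessOut_nextPage.1 ≠ pvDiffWitnessOut_nextPage.2
def Claim_exact_nextPage : Prop := ∀ (dv : String) (currentURL : String) (currentPage : Int), Dom_nextPage dv currentURL currentPage → Pre_nextPage dv currentURL currentPage → D_nextPage dv currentURL currentPage → nextPage dv currentURL currentPage ≠ nextPage_alt dv currentURL currentPage

-- ===== LEMMAS AND PROOFS =====

-- the while loop only appends to tempLink
theorem nextPageLoopA_snd_prefix (cs : List Char) (fuel : Nat) (i : Int) (tl : List Int) :
    ∃ suf, (nextPageLoopA cs fuel i tl).2 = tl ++ suf := by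
  induction fuel generalizing i tl with
  | zero => exact ⟨[], by simp [nextPageLoopA]⟩
  | succ n ih =>
    unfold nextPageLoopA
    split_ifs with h1 h2
    · exact ⟨[], by simp⟩
    · obtain ⟨suf, hs⟩ := ih
        (PySem.Chars.findFrom cs "&".toList (PySem.Chars.findFrom cs "pageNumber=".toList i + 11))
        (tl ++ [PySem.Chars.findFrom cs "pageNumber=".toList i + 11] ++
          [PySem.Chars.findFrom cs "&".toList (PySem.Chars.findFrom cs "pageNumber=".toList i + 11)])
      exact ⟨[PySem.Chars.findFrom cs "pageNumber=".toList i + 11,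
        PySem.Chars.findFrom cs "&".toList (PySem.Chars.findFrom cs "pageNumber=".toList i + 11)] ++ suf,
        by rw [hs]; simp⟩
    · exact ⟨[], by simp⟩

-- replace-accumulator fold over a nonempty range yields the last index
theorem foldl_last_range (m : Nat) (hm : 0 < m) (i : Int) :
    ((List.range m).map (fun (k : Nat) => (k : Int))).foldl (fun _ j => j) i = (m : Int) - 1 := by
  obtain ⟨k, rfl⟩ := Nat.exists_eq_add_of_lt hm
  rw [List.range_succ]
  simp

theorem pyRange_zero_toNat (cnt : Int) :
    PySem.List.pyRange 0 cnt = (List.range cnt.toNat).map (fun (k : Nat) => (k : Int)) := by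
  by_cases h : 0 ≤ cnt
  · rw [show cnt = ((cnt.toNat : Nat) : Int) by omega, PySem.List.pyRange_zero_natCast]
    simp [show max cnt 0 = cnt from by omega]
  · rw [show cnt.toNat = 0 by omega]
    simp [PySem.List.pyRange]; omega

theorem flatMap_range_pyGet (cs : List Char) (b m : Nat) :
    ((List.range m).map (fun (k : Nat) => (k : Int))).flatMap
        (fun j => (PySem.List.pyGet? cs (j + (b:Int))).toList)
      = (cs.drop b).take m := by
  induction m with
  | zero => simp
  | succ k ih =>
    rw [List.range_succ, List.map_append, List.flatMap_append, ih, List.take_add_one]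
    simp only [List.map_cons, List.map_nil, List.flatMap_cons, List.flatMap_nil, List.append_nil]
    rw [show (k:Int) + (b:Int) = ((b + k : Nat) : Int) by push_cast; ring, PySem.List.pyGet?_natCast]
    simp [List.getElem?_drop]

theorem flatMap_range_pyGet0 (cs : List Char) (m : Nat) :
    ((List.range m).map (fun (k : Nat) => (k : Int))).flatMap
        (fun j => (PySem.List.pyGet? cs j).toList)
      = cs.take m := by
  have h := flatMap_range_pyGet cs 0 m
  simpa using h

-- characterization of A on the non-trivial branch: prefix ++ new number ++ truncated tail
theorem nextPageA_char (dv : String) (u : String) (p : Int) (m : Nat)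
    (hp : ¬ p + 1 = 1) (hf : PySem.Chars.find u.toList "pageNumber=".toList ≠ -1)
    (hm : PySem.Chars.find u.toList "pageNumber=".toList = (m : Int)) :
    nextPage dv u p = String.ofList (u.toList.take (m + 11) ++ (PySem.Int.toStr (p + 2)).toList ++
      (u.toList.drop (m + 11 + (PySem.Int.toStr (p + 2)).toList.length)).take
        ((u.toList.length : Int) - 2 * (m : Int) - 21 -
          ((PySem.Int.toStr (p + 2)).toList.length : Int)).toNat) := by
  unfold nextPage
  simp only [hp, if_false]
  have hidx0 : (0:Int) ≤ (m : Int) := by positivity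
  have hspec := PySem.Chars.find_spec (s := u.toList) (sub := "pageNumber=".toList) (by rw [hm]; positivity)
  rw [hm] at hspec
  have hlen11 : m + 11 ≤ u.toList.length := by
    have h1 := hspec.1.length_le
    rw [show ("pageNumber=".toList).length = 11 from by decide, List.length_drop] at h1
    simp only [Int.toNat_natCast] at h1
    omega
  have hlpos : (0:Int) < (u.toList.length : Int) := by omega
  have hstep : nextPageLoopA u.toList (u.toList.length + 1) 0 [] =
      nextPageLoopA u.toList u.toList.length
        (PySem.Chars.findFrom u.toList "&".toList ((m:Int) + 11))
        ([(m:Int) + 11] ++ [PySem.Chars.findFrom u.toList "&".toList ((m:Int) + 11)]) := by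
    conv_lhs => unfold nextPageLoopA
    rw [if_pos hlpos, PySem.Chars.findFrom_zero, if_neg hf, hm]
    simp only [List.nil_append]
  obtain ⟨suf, hsuf⟩ := nextPageLoopA_snd_prefix u.toList u.toList.length
    (PySem.Chars.findFrom u.toList "&".toList ((m:Int) + 11))
    ([(m:Int) + 11] ++ [PySem.Chars.findFrom u.toList "&".toList ((m:Int) + 11)])
  have hget : PySem.List.pyGet? (nextPageLoopA u.toList (u.toList.length + 1) 0 []).2 0 =
      some ((m:Int) + 11) := by
    rw [hstep, hsuf]
    simp [PySem.List.pyGet?, PySem.List.pyIdx?]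
    rw [if_pos (by positivity)]
    simp
  simp only [hget]
  have hcast : (m:Int) + 11 = ((m + 11 : Nat) : Int) := by push_cast; ring
  rw [hcast, PySem.List.pyRange_zero_natCast]
  rw [PySem.List.foldl_prod_mk (f := fun l j => l ++ (PySem.List.pyGet? u.toList j).toList)
    (g := fun _ j => j)]
  have hst1 : List.foldl (fun l j => l ++ (PySem.List.pyGet? u.toList j).toList) []
      ((List.range (m + 11)).map (fun (k : Nat) => (k : Int))) = u.toList.take (m + 11) := by
    rw [PySem.List.foldl_append_eq_flatMap]
    simpa using flatMap_range_pyGet0 u.toList (m + 11)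
  have hst2 := foldl_last_range (m + 11) (by omega)
    (nextPageLoopA u.toList (u.toList.length + 1) 0 []).1
  dsimp only
  rw [hst1, hst2]
  rw [pyRange_zero_toNat]
  rw [PySem.List.foldl_append_eq_flatMap]
  simp only [show ∀ j : Int, j + ((m + 11 : Nat) : Int) + ((PySem.Int.toStr (p + 2)).toList.length : Int)
      = j + ((m + 11 + (PySem.Int.toStr (p + 2)).toList.length : Nat) : Int) from
    fun j => by push_cast; ring]
  rw [flatMap_range_pyGet]
  rw [show ((u.toList.length : Int) - (((m + 11 : Nat) : Int) - 1) - ((m + 11 : Nat) : Int) -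
        ((PySem.Int.toStr (p + 2)).toList.length : Int))
      = ((u.toList.length : Int) - 2 * (m : Int) - 21 -
        ((PySem.Int.toStr (p + 2)).toList.length : Int)) from by push_cast; ring]

-- characterization of B on the non-trivial branch: prefix ++ new number ++ whole tail
theorem nextPageB_char (dv : String) (u : String) (p : Int) (m : Nat)
    (hp : ¬ p + 1 = 1) (hf : PySem.Chars.find u.toList "pageNumber=".toList ≠ -1)
    (hm : PySem.Chars.find u.toList "pageNumber=".toList = (m : Int)) :
    nextPage_alt dv u p = String.ofList (u.toList.take (m + 11) ++ (PySem.Int.toStr (p + 2)).toList ++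
      u.toList.drop (m + 11 + (PySem.Int.toStr (p + 2)).toList.length)) := by
  unfold nextPage_alt
  simp only [hp, if_false, hm]
  rw [if_neg (by rw [← hm]; exact hf)]
  rw [PySem.List.slice_to _ (by positivity),
      PySem.List.slice_from _ (by positivity)]
  rw [show ((m : Int) + 11).toNat = m + 11 from by omega,
      show ((m : Int) + 11 + ((PySem.Int.toStr (p + 2)).toList.length : Int)).toNat
        = m + 11 + (PySem.Int.toStr (p + 2)).toList.length from by omega]

theorem nextPage_spec : Claim_unchanged_nextPage := by
  intro dv u p _ hpre hnd
  by_cases hp : p + 1 = 1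
  · simp [nextPage, nextPage_alt, hp]
  · have hf : PySem.Chars.find u.toList "pageNumber=".toList ≠ -1 := by
      rcases hpre with h | h
      · exact absurd h hp
      · exact h
    obtain ⟨m, hm⟩ : ∃ m : Nat, PySem.Chars.find u.toList "pageNumber=".toList = (m : Int) := by
      have := PySem.Chars.neg_one_le_find u.toList "pageNumber=".toList
      exact ⟨(PySem.Chars.find u.toList "pageNumber=".toList).toNat, by omega⟩
    have hc : ¬ (PySem.Chars.find u.toList "pageNumber=".toList + 11 +
        ((PySem.Int.toStr (p + 2)).toList.length : Int) < (u.toList.length : Int)) := by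
      intro hc
      exact hnd ⟨hp, hf, hc⟩
    rw [hm] at hc
    rw [nextPageA_char dv u p m hp hf hm, nextPageB_char dv u p m hp hf hm]
    have h1 : ((u.toList.length : Int) - 2 * (m : Int) - 21 -
        ((PySem.Int.toStr (p + 2)).toList.length : Int)).toNat = 0 := by omega
    have h2 : u.toList.drop (m + 11 + (PySem.Int.toStr (p + 2)).toList.length) = [] :=
      List.drop_eq_nil_of_le (by omega)
    rw [h1, h2]
    simp
    
theorem nextPage_changed : Claim_changed_nextPage := by
  unfold Claim_changed_nextPage; decide

theorem nextPage_tight : Claim_exact_nextPage := by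
  intro dv u p _ _ hd
  obtain ⟨hp, hf, hc⟩ := hd
  obtain ⟨m, hm⟩ : ∃ m : Nat, PySem.Chars.find u.toList "pageNumber=".toList = (m : Int) := by
    have := PySem.Chars.neg_one_le_find u.toList "pageNumber=".toList
    exact ⟨(PySem.Chars.find u.toList "pageNumber=".toList).toNat, by omega⟩
  rw [hm] at hc
  have hlen11 : m + 11 ≤ u.toList.length := by
    have hspec := PySem.Chars.find_spec (s := u.toList) (sub := "pageNumber=".toList)
      (by rw [hm]; positivity)
    rw [hm] at hspec
    have h1 := hspec.1.length_le
    rw [show ("pageNumber=".toList).length = 11 from by decide, List.length_drop] at h1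
    simp only [Int.toNat_natCast] at h1
    omega
  rw [nextPageA_char dv u p m hp hf hm, nextPageB_char dv u p m hp hf hm]
  intro heq
  have hh := congrArg (fun s : String => s.toList.length) heq
  simp only [String.toList_ofList, List.length_append, List.length_take, List.length_drop] at hh
  omega
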